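-- pv_equiv track=rewrite | github.com/shunyao01/LeetCode | binary_search/time_based_key_value_store.py | bissect_right
-- ===== SOURCE A (Python) =====
-- def bissect_right(blist, target) -> int:
--     """Bisect right: return the index of first element bigger than target"""
--     low, high = 0, len(blist) - 1
--
--     while low <= high:
--         mid = (low + high) // 2
--         if blist[mid][1] <= target:
--             low = mid + 1
--         else:
--             high = mid - 1
--
--     return low  # index of first element with timestamp > target
-- ===== SOURCE B (Python) =====
-- def bissect_right(blist, target) -> int:
--     """Bisect right: return the index of first element bigger than target.
--
--     Recursive divide-and-conquer on sublists: split at m = (len-1)//2 (the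
--     same probe position A's iterative loop uses), recurse on a slice.
--     """
--     if not blist:
--         return 0
--     m = (len(blist) - 1) // 2
--     if blist[m][1] <= target:
--         return m + 1 + bissect_right(blist[m + 1:], target)
--     return bissect_right(blist[:m], target)
-- ===== Notes on version B (the rewrite author's own statement) =====
-- stated objective: alternative
-- what changed: The iterative two-pointer while loop over (low, high) indices is replaced by a recursive divide-and-conquer that splits the list itself at the probe position and recurses on a slice, with no index state.
import Mathlib
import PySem

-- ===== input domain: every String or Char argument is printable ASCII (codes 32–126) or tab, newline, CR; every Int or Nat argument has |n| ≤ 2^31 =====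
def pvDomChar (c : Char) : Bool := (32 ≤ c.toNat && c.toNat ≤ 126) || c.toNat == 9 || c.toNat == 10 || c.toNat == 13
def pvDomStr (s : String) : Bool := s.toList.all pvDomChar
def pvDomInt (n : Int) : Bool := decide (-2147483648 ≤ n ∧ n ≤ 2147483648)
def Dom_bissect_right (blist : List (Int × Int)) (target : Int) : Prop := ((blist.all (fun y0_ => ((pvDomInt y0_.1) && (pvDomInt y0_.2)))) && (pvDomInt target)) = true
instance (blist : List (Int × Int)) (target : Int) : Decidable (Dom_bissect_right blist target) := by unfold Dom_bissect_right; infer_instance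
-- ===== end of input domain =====

-- B replaces A's iterative (low, high) index loop by a recursive divide-and-conquer on
-- list slices (objective: alternative; same probe sequence, no index state).

-- ===== PORT A =====
-- the while loop of A, as recursion over the loop state (low, high)
def bissect_rightLoop (blist : List (Int × Int)) (target : Int) (low high : Int) : Int :=
  if h : low ≤ high then
    let mid := PySem.Int.floordiv (low + high) 2
    -- blist[mid] is always in range when A runs; pyGetD totalizes the access
    if (PySem.List.pyGetD blist mid (0, 0)).2 ≤ target then
      bissect_rightLoop blist target (mid + 1) high
    else
      bissect_rightLoop blist target low (mid - 1)
  else low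
termination_by (high + 1 - low).toNat
decreasing_by
  · have := PySem.Int.floordiv_two_mid_bounds h
    omega
  · have := PySem.Int.floordiv_two_mid_bounds h
    omega

def bissect_right (blist : List (Int × Int)) (target : Int) : Int :=
  bissect_rightLoop blist target 0 ((blist.length : Int) - 1)

-- ===== PORT B =====
def bissect_right_alt (blist : List (Int × Int)) (target : Int) : Int :=
  if blist = [] then 0
  else
    let m : Nat := (blist.length - 1) / 2      -- (len(blist) - 1) // 2, len ≥ 1
    if (PySem.List.pyGetD blist (m : Int) (0, 0)).2 ≤ target then
      (m : Int) + 1 + bissect_right_alt (PySem.List.slice blist (some ((m : Int) + 1)) none) target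
    else
      bissect_right_alt (PySem.List.slice blist none (some (m : Int))) target
termination_by blist.length
decreasing_by
  · rename_i hne _
    have h1 : ((m : Int) + 1) = (((m + 1 : Nat) : Int)) := by push_cast; ring
    rw [h1, PySem.List.slice_from_natCast]
    have : blist.length ≠ 0 := fun h => hne (List.eq_nil_of_length_eq_zero h)
    simp [List.length_drop]; omega
  · rename_i hne _
    rw [PySem.List.slice_to_natCast]
    have : blist.length ≠ 0 := fun h => hne (List.eq_nil_of_length_eq_zero h)
    simp [List.length_take]; omega

-- ===== PRECONDITION & SPEC =====
def Spec_bissect_right (blist : List (Int × Int)) (target : Int) (out : Int) : Prop := out = bissect_right_alt blist target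
instance (blist : List (Int × Int)) (target : Int) (out : Int) : Decidable (Spec_bissect_right blist target out) := by unfold Spec_bissect_right; infer_instance

-- ===== CLAIM (what is proved, stated in full; the proofs are below) =====
def Claim_equal_bissect_right : Prop := ∀ (blist : List (Int × Int)) (target : Int), Dom_bissect_right blist target → Spec_bissect_right blist target (bissect_right blist target)

-- ===== LEMMAS AND PROOFS =====

-- A's loop on the index window [low, low+n-1] equals low plus B on the corresponding slice.
theorem loop_eq_alt (target : Int) (n : Nat) :
    ∀ (blist : List (Int × Int)) (low : Int), 0 ≤ low → low.toNat + n ≤ blist.length →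
      bissect_rightLoop blist target low (low + n - 1)
        = low + bissect_right_alt ((blist.drop low.toNat).take n) target := by
  induction n using Nat.strong_induction_on with
  | _ n ih =>
    intro blist low hlow hlen
    rcases Nat.eq_zero_or_pos n with hn | hn
    · subst hn
      rw [bissect_rightLoop, bissect_right_alt]
      simp
    · -- n ≥ 1: the segment is nonempty
      have hseglen : ((blist.drop low.toNat).take n).length = n := by
        simp [List.length_take, List.length_drop]; omega
      have hne : (blist.drop low.toNat).take n ≠ [] := by
        intro h; rw [h] at hseglen; simp at hseglen; omega
      set m : Nat := (n - 1) / 2 with hm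
      have hmlt : m < n := by omega
      -- the midpoint of A's window
      have hmid : PySem.Int.floordiv (low + (low + n - 1)) 2 = low + (m : Int) := by
        rw [PySem.Int.floordiv_eq_iff_of_pos (by omega)]
        have h2 : 2 * ((n - 1) / 2) ≤ n - 1 ∧ n - 1 < 2 * ((n - 1) / 2) + 2 := by omega
        constructor <;> (push_cast; omega)
      -- A probes blist[low+m]; B probes seg[m]; they are the same element
      have hidx : low.toNat + m < blist.length := by omega
      have hA : PySem.List.pyGetD blist (low + (m : Int)) (0, 0)
          = blist[low.toNat + m] := by
        have hcast : low + (m : Int) = ((low.toNat + m : Nat) : Int) := by push_cast; omega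
        rw [hcast, PySem.List.pyGetD_natCast, List.getD_eq_getElem?_getD,
          List.getElem?_eq_getElem hidx]
        rfl
      have hB : PySem.List.pyGetD ((blist.drop low.toNat).take n) (m : Int) (0, 0)
          = blist[low.toNat + m] := by
        rw [PySem.List.pyGetD_natCast]
        rw [List.getD_eq_getElem?_getD]
        rw [List.getElem?_take, if_pos hmlt, List.getElem?_drop]
        simp [hidx]
      rw [bissect_rightLoop]
      rw [dif_pos (by omega : low ≤ low + (n : Int) - 1)]
      rw [bissect_right_alt, if_neg hne]
      simp only [hseglen, ← hm]
      rw [hmid, hA, hB]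
      by_cases hc : (blist[low.toNat + m]).2 ≤ target
      · rw [if_pos hc, if_pos hc]
        -- descend right: window [low+m+1, low+n-1], segment seg[m+1:]
        have hslice : PySem.List.slice ((blist.drop low.toNat).take n) (some ((m : Int) + 1)) none
            = (blist.drop (low.toNat + (m + 1))).take (n - (m + 1)) := by
          have h1 : ((m : Int) + 1) = (((m + 1 : Nat) : Int)) := by push_cast; ring
          rw [h1, PySem.List.slice_from_natCast]
          rw [List.drop_take, List.drop_drop]
        have hstep := ih (n - (m + 1)) (by omega) blist (low + (m : Int) + 1)
          (by omega) (by omega)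
        have harg : low + (m : Int) + 1 + ((n - (m + 1) : Nat) : Int) - 1 = low + n - 1 := by
          push_cast; omega
        have htonat : (low + (m : Int) + 1).toNat = low.toNat + (m + 1) := by omega
        rw [harg, htonat] at hstep
        rw [hstep, hslice]
        push_cast; ring
      · rw [if_neg hc, if_neg hc]
        -- descend left: window [low, low+m-1], segment seg[:m]
        have hslice : PySem.List.slice ((blist.drop low.toNat).take n) none (some (m : Int))
            = (blist.drop low.toNat).take m := by
          rw [PySem.List.slice_to_natCast, List.take_take]
          congr 1 <;> omega
        have hstep := ih m (by omega) blist low hlow (by omega)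
        rw [hslice]
        have harg : low + (m : Int) - 1 = low + ((m : Nat) : Int) - 1 := by push_cast; ring
        rw [harg, hstep]

-- ===== VERDICT (by name: the statement is the Claim_ definition above) =====
theorem bissect_right_spec : Claim_equal_bissect_right := by
  intro blist target _
  unfold Spec_bissect_right bissect_right
  have h := loop_eq_alt target blist.length blist 0 le_rfl (by simp)
  simpa using h
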